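-- pv_equiv track=rewrite | github.com/janjagusch/advent-of-code | aoc_2020/day_10/solution.py | calc_compat_map
-- ===== SOURCE A (Python) =====
-- def calc_compat_map(adapters):
--     return {
--         adapter: tuple(
--             sorted(
--                 compat_adapter
--                 for compat_adapter in adapters
--                 if compat_adapter > adapter and compat_adapter <= adapter + 3
--             )
--         )
--         for adapter in adapters
--     }
-- ===== SOURCE B (Python) =====
-- def calc_compat_map(adapters):
--     counts = {}
--     for a in adapters:
--         counts[a] = counts.get(a, 0) + 1
--     return {
--         a: tuple([a + 1] * counts.get(a + 1, 0)
--                  + [a + 2] * counts.get(a + 2, 0)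
--                  + [a + 3] * counts.get(a + 3, 0))
--         for a in adapters
--     }
-- ===== Notes on version B (the rewrite author's own statement) =====
-- stated objective: faster
-- what changed: Replaces the per-key full scan + sort with a single counting pass: a multiplicity table is built once, and each key's compatible tuple is assembled directly as counts[a+1] copies of a+1, then a+2, then a+3 (already in sorted order).
import Mathlib
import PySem

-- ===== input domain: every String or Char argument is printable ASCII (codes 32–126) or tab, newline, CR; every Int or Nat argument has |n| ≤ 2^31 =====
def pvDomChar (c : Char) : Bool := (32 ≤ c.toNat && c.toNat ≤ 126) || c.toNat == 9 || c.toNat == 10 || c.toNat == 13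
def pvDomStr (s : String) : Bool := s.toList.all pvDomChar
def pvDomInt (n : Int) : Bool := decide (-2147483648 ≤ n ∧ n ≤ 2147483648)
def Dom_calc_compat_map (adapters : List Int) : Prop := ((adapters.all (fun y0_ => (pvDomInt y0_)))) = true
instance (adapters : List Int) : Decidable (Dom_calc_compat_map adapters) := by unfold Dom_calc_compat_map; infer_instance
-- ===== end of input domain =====

-- B replaces A's per-key full scan + sort by one counting pass and a direct assembly of the
-- (adapter, adapter+3] window from the multiplicity table (objective: faster).

-- ===== PORT A =====
-- dict comprehension: for each adapter, sorted filter of the whole list, inserted in order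
def calc_compat_map (adapters : List Int) : List (Int × List Int) :=
  (adapters.foldl (fun d adapter =>
      d.insert adapter
        (PySem.List.sorted
          (adapters.filter (fun c => decide (adapter < c) && decide (c ≤ adapter + 3)))
          (fun x => x) false))
    PySem.Dict.empty).items

-- ===== PORT B =====
def calc_compat_map_alt (adapters : List Int) : List (Int × List Int) :=
  let counts := adapters.foldl (fun d a => d.insert a (d.getD a 0 + 1)) PySem.Dict.empty
  (adapters.foldl (fun d a =>
      d.insert a
        (PySem.List.pyRepeat [a + 1] (counts.getD (a + 1) 0) ++
         PySem.List.pyRepeat [a + 2] (counts.getD (a + 2) 0) ++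
         PySem.List.pyRepeat [a + 3] (counts.getD (a + 3) 0)))
    PySem.Dict.empty).items

-- ===== PRECONDITION & SPEC =====
def Spec_calc_compat_map (adapters : List Int) (out : List (Int × List Int)) : Prop := out = calc_compat_map_alt adapters
instance (adapters : List Int) (out : List (Int × List Int)) : Decidable (Spec_calc_compat_map adapters out) := by unfold Spec_calc_compat_map; infer_instance

-- ===== CLAIM (what is proved, stated in full; the proofs are below) =====
def Claim_equal_calc_compat_map : Prop := ∀ (adapters : List Int), Dom_calc_compat_map adapters → Spec_calc_compat_map adapters (calc_compat_map adapters)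

-- ===== LEMMAS AND PROOFS =====

-- the sorted filtered window (a, a+3] is exactly the counted copies of a+1, a+2, a+3 in order
lemma window_eq (a : Int) (l : List Int) :
    PySem.List.sorted (l.filter (fun c => decide (a < c) && decide (c ≤ a + 3))) (fun x => x) false
      = List.replicate (l.count (a + 1)) (a + 1) ++
        List.replicate (l.count (a + 2)) (a + 2) ++
        List.replicate (l.count (a + 3)) (a + 3) := by
  apply PySem.List.sorted_id_eq_of_perm_of_pairwise
  · rw [List.perm_iff_count]
    intro v
    by_cases hv : a < v ∧ v ≤ a + 3
    · have h1 : (fun c => decide (a < c) && decide (c ≤ a + 3)) v = true := by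
        simp [hv.1, hv.2]
      rw [show List.count v (l.filter (fun c => decide (a < c) && decide (c ≤ a + 3)))
            = List.count v l from List.count_filter h1]
      have : v = a + 1 ∨ v = a + 2 ∨ v = a + 3 := by omega
      rcases this with h | h | h <;> subst h <;>
        simp [List.count_append, List.count_replicate]
    · have h0 : List.count v (l.filter (fun c => decide (a < c) && decide (c ≤ a + 3))) = 0 := by
        rw [List.count_eq_zero]
        intro hmem
        rcases List.mem_filter.mp hmem with ⟨_, hp⟩
        simp at hp; omega
      rw [h0]
      simp [List.count_append, List.count_replicate]
      omega
  · refine List.pairwise_append.mpr ⟨?_, ?_, ?_⟩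
    · refine List.pairwise_append.mpr ⟨?_, ?_, ?_⟩
      · exact (List.pairwise_replicate).mpr (Or.inr le_rfl)
      · exact (List.pairwise_replicate).mpr (Or.inr le_rfl)
      · intro x hx y hy
        rw [List.eq_of_mem_replicate hx, List.eq_of_mem_replicate hy]; omega
    · exact (List.pairwise_replicate).mpr (Or.inr le_rfl)
    · intro x hx y hy
      rw [List.eq_of_mem_replicate hy]
      rcases List.mem_append.mp hx with h | h <;>
        rw [List.eq_of_mem_replicate h] <;> omega

-- ===== VERDICT (by name: the statement is the Claim_ definition above) =====
theorem calc_compat_map_spec : Claim_equal_calc_compat_map := by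
  intro adapters _
  unfold Spec_calc_compat_map calc_compat_map calc_compat_map_alt
  congr 2
  funext d a
  congr 1
  rw [window_eq]
  simp [PySem.List.pyRepeat_singleton, PySem.Dict.getD_foldl_insert_add_one]
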